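-- pv_equiv track=rewrite | github.com/hb-FA37/foobar | bunny-worker-locations/solution.py | solution_iteration
-- ===== SOURCE A (Python) =====
-- def solution_iteration(x, y):
--     """Adaption of the recursive solution to a loop to prevent hitting the max
--     recursion limit.
--     """
--
--     count = 1
--
--     while x != 1 or y != 1:
--         if x != 1:
--             x = x - 1
--             y = y + 1
--         else:
--             x = y - 1
--             y = 1
--
--         count = count + 1
--
--     return str(count)
-- ===== SOURCE B (Python) =====
-- def solution_iteration(x, y):
--     """Closed-form: cell id on diagonal x+y is the triangular number of the
--     previous diagonals plus x."""
--     return str((x + y - 2) * (x + y - 1) // 2 + x)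
-- ===== Notes on version B (the rewrite author's own statement) =====
-- stated objective: faster
-- what changed: Replaced the step-by-step diagonal walk (one loop iteration per cell counted) with the closed-form triangular-number formula (x+y-2)(x+y-1)//2 + x.
import Mathlib
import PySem

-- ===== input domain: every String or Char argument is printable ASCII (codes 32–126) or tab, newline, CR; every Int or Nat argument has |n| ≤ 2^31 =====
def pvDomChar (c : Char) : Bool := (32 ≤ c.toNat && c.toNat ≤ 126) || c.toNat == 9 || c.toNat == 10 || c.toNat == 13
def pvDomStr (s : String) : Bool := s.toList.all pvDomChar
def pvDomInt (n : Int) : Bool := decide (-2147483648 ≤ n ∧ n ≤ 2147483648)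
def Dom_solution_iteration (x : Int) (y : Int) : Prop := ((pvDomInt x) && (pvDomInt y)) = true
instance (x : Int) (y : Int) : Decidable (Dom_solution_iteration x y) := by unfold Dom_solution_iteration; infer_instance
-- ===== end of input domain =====

-- B replaces A's step-by-step diagonal walk with the closed-form triangular-number
-- formula (x+y-2)(x+y-1)//2 + x (objective: faster, O(1) vs O((x+y)^2)).


-- ===== PORT A =====
-- Triangular number s*(s+1)/2; used only to size the fuel of the loop below.
def triSI (s : Int) : Int := s * (s + 1) / 2

-- Python's while loop, made total with a fuel parameter; the fuel chosen in
-- solution_iteration is exact (never exhausted) on every input satisfying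
-- Pre_solution_iteration (where the Python loop terminates).
def loopSI : Nat → Int → Int → Int → Int
  | 0, _, _, count => count
  | fuel + 1, x, y, count =>
    if x = 1 ∧ y = 1 then count
    else if x ≠ 1 then loopSI fuel (x - 1) (y + 1) (count + 1)
    else loopSI fuel (y - 1) 1 (count + 1)

def solution_iteration (x : Int) (y : Int) : String :=
  PySem.Int.toStr (loopSI (triSI (x + y - 2) + x).toNat x y 1)

-- ===== PORT B =====
def solution_iteration_alt (x : Int) (y : Int) : String :=
  PySem.Int.toStr (PySem.Int.floordiv ((x + y - 2) * (x + y - 1)) 2 + x)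

-- ===== PRECONDITION & SPEC =====
-- Exactly the inputs on which A's while loop terminates; for x < 1 or x + y < 2
-- the Python loop runs forever (no value is returned), so those are excluded.
def Pre_solution_iteration (x : Int) (y : Int) : Prop := 1 ≤ x ∧ 2 ≤ x + y
instance (x : Int) (y : Int) : Decidable (Pre_solution_iteration x y) := by unfold Pre_solution_iteration; infer_instance
def pvWitness_solution_iteration : Int × Int := (3, 2)

def Spec_solution_iteration (x : Int) (y : Int) (out : String) : Prop := out = solution_iteration_alt x y
instance (x : Int) (y : Int) (out : String) : Decidable (Spec_solution_iteration x y out) := by unfold Spec_solution_iteration; infer_instance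

-- ===== CLAIM (what is proved, stated in full; the proofs are below) =====
def Claim_equal_solution_iteration : Prop := ∀ (x : Int) (y : Int), Dom_solution_iteration x y → Pre_solution_iteration x y → Spec_solution_iteration x y (solution_iteration x y)

-- ===== LEMMAS AND PROOFS =====

theorem triSI_succ (s : Int) : triSI s = triSI (s - 1) + s := by
  unfold triSI
  have h : s * (s + 1) = (s - 1) * s + s * 2 := by ring
  rw [h, Int.add_mul_ediv_right _ _ (by norm_num : (2:Int) ≠ 0)]
  ring_nf

theorem triSI_nonneg (s : Int) (hs : 0 ≤ s) : 0 ≤ triSI s := by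
  unfold triSI
  exact Int.ediv_nonneg (by positivity) (by norm_num)

theorem triSI_pos (s : Int) (hs : 1 ≤ s) : 1 ≤ triSI s := by
  have h := triSI_nonneg (s - 1) (by omega)
  have h2 := triSI_succ s
  omega

-- Loop invariant: with enough fuel, the walk from (x, y) with running count c
-- returns c + (triSI (x+y-2) + x) - 1.
theorem loopSI_eq (fuel : Nat) : ∀ (x y c : Int), 1 ≤ x → 2 ≤ x + y →
    triSI (x + y - 2) + x ≤ (fuel : Int) + 1 →
    loopSI fuel x y c = c + (triSI (x + y - 2) + x) - 1 := by
  induction fuel with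
  | zero =>
    intro x y c hx hxy hf
    have ht0 := triSI_nonneg (x + y - 2) (by omega)
    have hx1 : x = 1 := by omega
    have ht : triSI (x + y - 2) = 0 := by omega
    have hy1 : y = 1 := by
      by_contra hy
      have : 1 ≤ triSI (x + y - 2) := triSI_pos _ (by omega)
      omega
    subst hx1; subst hy1
    have h0 : triSI 0 = 0 := by decide
    simp [loopSI]
    omega
  | succ n ih =>
    intro x y c hx hxy hf
    by_cases hdone : x = 1 ∧ y = 1
    · obtain ⟨hx1, hy1⟩ := hdone
      subst hx1; subst hy1
      norm_num [loopSI, triSI]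
    · by_cases hx1 : x = 1
      · -- jump branch: x = 1, y ≠ 1
        have hy : y ≠ 1 := fun h => hdone ⟨hx1, h⟩
        subst hx1
        have hy2 : 2 ≤ y := by omega
        have hstep : triSI (y - 1 + 1 - 2) + (y - 1) = triSI (1 + y - 2) + 1 - 1 := by
          have h1 : y - 1 + 1 - 2 = (1 + y - 2) - 1 := by ring
          have h2 := triSI_succ (1 + y - 2)
          rw [h1]; omega
        rw [loopSI]
        simp only [hy]
        norm_num
        have hf' : triSI (y - 1 + 1 - 2) + (y - 1) ≤ (n : Int) + 1 := by
          push_cast at hf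
          omega
        rw [ih (y - 1) 1 (c + 1) (by omega) (by omega) hf']
        omega
      · -- walk branch: x ≠ 1
        have e_eq : triSI (x - 1 + (y + 1) - 2) = triSI (x + y - 2) :=
          congrArg triSI (by ring)
        rw [loopSI]
        simp only [hx1, false_and, if_false, ne_eq, not_false_eq_true, ite_true]
        have hf' : triSI (x - 1 + (y + 1) - 2) + (x - 1) ≤ (n : Int) + 1 := by
          push_cast at hf
          omega
        rw [ih (x - 1) (y + 1) (c + 1) (by omega) (by omega) hf']
        omega

-- ===== VERDICT (by name: the statement is the Claim_ definition above) =====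
theorem solution_iteration_spec : Claim_equal_solution_iteration := by
  intro x y _ hpre
  obtain ⟨hx, hxy⟩ := hpre
  unfold Spec_solution_iteration solution_iteration solution_iteration_alt
  have hN : 1 ≤ triSI (x + y - 2) + x := by
    have := triSI_nonneg (x + y - 2) (by omega); omega
  have hfuel : triSI (x + y - 2) + x ≤ ((triSI (x + y - 2) + x).toNat : Int) + 1 := by omega
  rw [loopSI_eq _ x y 1 hx hxy hfuel]
  rw [PySem.Int.floordiv_eq_ediv_of_pos (by norm_num : (0:Int) < 2)]
  have hP : (x + y - 2) * (x + y - 1) = (x + y - 2) * ((x + y - 2) + 1) := by ring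
  congr 1
  rw [hP]
  unfold triSI
  omega
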